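-- pv_equiv track=rewrite | github.com/IBM/ansible-for-i | plugins/modules/ibmi_fix_repo.py | checksum_before_upsert
-- ===== SOURCE A (Python) =====
-- def checksum_before_upsert(_type, list_from_db, list_from_file):
--     for db_item in list_from_db:
--         for file_item in list_from_file:
--             if (
--                 (_type == 'ptf_group' and
--                  db_item.get('ptf_group_number') == file_item.get('ptf_group_number') and
--                  db_item.get('ptf_group_level') == file_item.get('ptf_group_level'))
--                 or
--                 (_type == 'single_ptf' and
--                  db_item.get('ptf_id') == file_item.get('ptf_id'))
--             ):
--                 for key, val in file_item.items():
--                     # if the input checksum not match with the calculated checksum,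
--                     # override the input with the real checksum for the db record and no error thrown.
--                     if db_item.get(key) is None or db_item.get(key) != val:
--                         db_item[key] = val
--     return list_from_db
-- ===== SOURCE B (Python) =====
-- # Re-implementation: one pass over the file list builds a hash index keyed by the
-- # match-field tuple, merging all file items of a key into a single dict; each db
-- # record then gets exactly one dict.update from its bucket instead of A's scan of
-- # the whole file list. Like A, it updates the db dicts in place and returns list_from_db.
-- def checksum_before_upsert(_type, list_from_db, list_from_file):
--     if _type == 'ptf_group':
--         fields = ('ptf_group_number', 'ptf_group_level')
--     elif _type == 'single_ptf':
--         fields = ('ptf_id',)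
--     else:
--         return list_from_db
--     index = {}
--     for file_item in list_from_file:
--         k = tuple(file_item.get(f) for f in fields)
--         index.setdefault(k, {}).update(file_item)
--     for db_item in list_from_db:
--         db_item.update(index.get(tuple(db_item.get(f) for f in fields), {}))
--     return list_from_db
-- ===== Notes on version B (the rewrite author's own statement) =====
-- stated objective: alternative
-- what changed: Instead of scanning the whole file list for every db record and re-applying each matching file item's fields one by one, B builds in one pass a hash index that merges all file items sharing a match-key tuple into a single dict, and each db record then gets exactly one dict.update from its bucket.
import Mathlib
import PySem

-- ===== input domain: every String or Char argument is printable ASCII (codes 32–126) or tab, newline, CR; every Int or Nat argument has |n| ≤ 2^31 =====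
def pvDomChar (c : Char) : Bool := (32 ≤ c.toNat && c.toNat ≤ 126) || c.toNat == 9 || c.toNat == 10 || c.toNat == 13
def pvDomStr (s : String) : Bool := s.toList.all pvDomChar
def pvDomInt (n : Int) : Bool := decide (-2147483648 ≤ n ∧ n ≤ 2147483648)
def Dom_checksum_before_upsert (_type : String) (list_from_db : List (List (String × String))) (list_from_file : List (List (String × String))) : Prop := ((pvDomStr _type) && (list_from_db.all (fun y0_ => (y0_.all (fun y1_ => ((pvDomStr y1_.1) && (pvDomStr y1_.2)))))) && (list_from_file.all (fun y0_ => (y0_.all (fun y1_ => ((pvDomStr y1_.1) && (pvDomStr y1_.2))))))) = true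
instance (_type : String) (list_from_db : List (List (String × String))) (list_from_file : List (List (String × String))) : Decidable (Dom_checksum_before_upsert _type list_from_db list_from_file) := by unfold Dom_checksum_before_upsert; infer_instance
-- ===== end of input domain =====

set_option maxRecDepth 4096


-- One line: B replaces A's per-db-record scan of the whole file list by a hash index that
-- merges the file items of each match-key into a single dict in one pass, applied once per db
-- record; in Python both mutate the db dicts in place, the equivalence is about the return value.

-- ===== PORT A =====
-- A's match condition, literally (db_item.get(...) == file_item.get(...) comparisons)
def pvCondA (t : String) (d fi : PySem.Dict String String) : Bool :=
  (t == "ptf_group"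
     && d.get? "ptf_group_number" == fi.get? "ptf_group_number"
     && d.get? "ptf_group_level" == fi.get? "ptf_group_level")
  || (t == "single_ptf" && d.get? "ptf_id" == fi.get? "ptf_id")

-- A's inner write: if db_item.get(key) is None or db_item.get(key) != val: db_item[key] = val
def pvWriteA (d : PySem.Dict String String) (kv : String × String) : PySem.Dict String String :=
  if d.get? kv.1 == none || !(d.get? kv.1 == some kv.2) then d.insert kv.1 kv.2 else d

-- A's inner loop over file_items for one db_item (db_item mutated in place -> fold over the Dict)
def pvFoldA (t : String) (file : List (List (String × String))) (d : PySem.Dict String String) :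
    PySem.Dict String String :=
  file.foldl (fun d fi =>
    if pvCondA t d (PySem.Dict.mk fi) then fi.foldl pvWriteA d else d) d

def checksum_before_upsert (_type : String) (list_from_db : List (List (String × String))) (list_from_file : List (List (String × String))) : List (List (String × String)) :=
  list_from_db.map (fun di => (pvFoldA _type list_from_file (PySem.Dict.mk di)).items)

-- ===== PORT B =====
-- the key fields B matches on, per _type (Source B's `fields` tuple / early return)
def pvKeyFields (t : String) : Option (List String) :=
  if t == "ptf_group" then some ["ptf_group_number", "ptf_group_level"]
  else if t == "single_ptf" then some ["ptf_id"] else none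

-- tuple(file_item.get(f) for f in fields)
def pvKeyB (fs : List String) (d : PySem.Dict String String) : List (Option String) :=
  fs.map d.get?

-- index.setdefault(k, {}).update(file_item)  (merge each key's file items into one dict)
def pvIndexB (fs : List String) (file : List (List (String × String))) :
    PySem.Dict (List (Option String)) (PySem.Dict String String) :=
  file.foldl (fun idx fi =>
    idx.insert (pvKeyB fs (PySem.Dict.mk fi))
      (PySem.Dict.update (idx.getD (pvKeyB fs (PySem.Dict.mk fi)) PySem.Dict.empty) fi))
    PySem.Dict.empty

def checksum_before_upsert_alt (_type : String) (list_from_db : List (List (String × String))) (list_from_file : List (List (String × String))) : List (List (String × String)) :=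
  match pvKeyFields _type with
  | none => list_from_db
  | some fields =>
    let index := pvIndexB fields list_from_file
    -- db_item.update(index.get(key, {}))
    list_from_db.map (fun di =>
      (PySem.Dict.update (PySem.Dict.mk di)
        (index.getD (pvKeyB fields (PySem.Dict.mk di)) PySem.Dict.empty).items).items)

-- ===== PRECONDITION & SPEC =====
-- Pre_ requires distinct keys within each inner association list: these are exactly the lists
-- that encode a Python dict (A's arguments ARE dicts, which cannot hold duplicate keys), so no
-- input the Python A accepts is excluded — duplicate-key lists encode no Python input at all.
def Pre_checksum_before_upsert (_type : String) (list_from_db : List (List (String × String))) (list_from_file : List (List (String × String))) : Prop :=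
  (∀ l ∈ list_from_db, (l.map Prod.fst).Nodup) ∧ (∀ l ∈ list_from_file, (l.map Prod.fst).Nodup)
instance (_type : String) (list_from_db : List (List (String × String))) (list_from_file : List (List (String × String))) : Decidable (Pre_checksum_before_upsert _type list_from_db list_from_file) := by unfold Pre_checksum_before_upsert; infer_instance

def pvWitness_checksum_before_upsert : String × (List (List (String × String))) × (List (List (String × String))) :=
  ("single_ptf", [[("ptf_id", "1"), ("checksum", "old")]], [[("ptf_id", "1"), ("checksum", "new")]])

def Spec_checksum_before_upsert (_type : String) (list_from_db : List (List (String × String))) (list_from_file : List (List (String × String))) (out : List (List (String × String))) : Prop := out = checksum_before_upsert_alt _type list_from_db list_from_file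
instance (_type : String) (list_from_db : List (List (String × String))) (list_from_file : List (List (String × String))) (out : List (List (String × String))) : Decidable (Spec_checksum_before_upsert _type list_from_db list_from_file out) := by unfold Spec_checksum_before_upsert; infer_instance

-- ===== CLAIM (what is proved, stated in full; the proofs are below) =====
def Claim_equal_checksum_before_upsert : Prop := ∀ (_type : String) (list_from_db : List (List (String × String))) (list_from_file : List (List (String × String))), Dom_checksum_before_upsert _type list_from_db list_from_file → Pre_checksum_before_upsert _type list_from_db list_from_file → Spec_checksum_before_upsert _type list_from_db list_from_file (checksum_before_upsert _type list_from_db list_from_file)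

-- ===== LEMMAS AND PROOFS =====

-- inserting the value a key already has (unique keys) changes nothing
theorem pv_insert_id (d : PySem.Dict String String) (k : String) (v : String)
    (hd : d.keys.Nodup) (h : d.get? k = some v) : d.insert k v = d := by
  have hc : d.contains k = true := by
    rw [PySem.Dict.contains_eq_isSome_get?, h]; rfl
  apply PySem.Dict.ext
  rw [PySem.Dict.items_insert_of_contains _ _ hc]
  have hid : ∀ p ∈ d.items, (if p.1 == k then (k, v) else p) = p := by
    intro p hp
    by_cases hpk : p.1 = k
    · obtain ⟨p1, p2⟩ := p
      simp only at hpk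
      subst hpk
      have h2 : d.get? p1 = some p2 := PySem.Dict.get?_of_mem_items d hp hd
      rw [h] at h2
      injection h2 with h3
      simp [h3]
    · simp [hpk]
  calc List.map (fun p => if p.1 == k then (k, v) else p) d.items
      = List.map id d.items := List.map_congr_left (by simpa using hid)
    _ = d.items := List.map_id _

-- A's guarded write is plain insert (unique keys)
theorem pv_writeA_eq_insert (d : PySem.Dict String String) (kv : String × String)
    (hd : d.keys.Nodup) : pvWriteA d kv = d.insert kv.1 kv.2 := by
  unfold pvWriteA
  cases hg : d.get? kv.1 with
  | none => simp
  | some w =>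
    by_cases hw : w = kv.2
    · subst hw
      rw [pv_insert_id d kv.1 kv.2 hd hg]
      simp
    · simp [hw]

-- A's inner key/val loop over a matching file_item is dict.update
theorem pv_guard_eq_update (ps : List (String × String)) (d : PySem.Dict String String)
    (hd : d.keys.Nodup) : ps.foldl pvWriteA d = PySem.Dict.update d ps := by
  induction ps generalizing d with
  | nil => rfl
  | cons kv ps ih =>
    show ps.foldl pvWriteA (pvWriteA d kv) = PySem.Dict.update d (kv :: ps)
    rw [pv_writeA_eq_insert d kv hd]
    rw [ih (d.insert kv.1 kv.2) (PySem.Dict.nodup_keys_insert d kv.1 kv.2 hd)]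
    rfl

theorem pv_get?_update_notin (ps : List (String × String)) (d : PySem.Dict String String)
    (f : String) (h : ∀ kv ∈ ps, kv.1 ≠ f) :
    (PySem.Dict.update d ps).get? f = d.get? f := by
  induction ps generalizing d with
  | nil => rfl
  | cons kv ps ih =>
    show (PySem.Dict.update (d.insert kv.1 kv.2) ps).get? f = d.get? f
    rw [ih _ (fun x hx => h x (List.mem_cons_of_mem _ hx))]
    exact PySem.Dict.get?_insert_of_ne d kv.2 (fun he => h kv (List.mem_cons_self) he.symm)

-- updating with a file_item that agrees with d on field f leaves d.get? f unchanged
theorem pv_get?_update_agree (ps : List (String × String)) (d : PySem.Dict String String)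
    (f : String) (hnd : (ps.map Prod.fst).Nodup)
    (h : (PySem.Dict.mk ps).get? f = d.get? f) :
    (PySem.Dict.update d ps).get? f = d.get? f := by
  induction ps generalizing d with
  | nil => rfl
  | cons kv ps ih =>
    rw [List.map_cons, List.nodup_cons] at hnd
    by_cases hk : kv.1 = f
    · have hmk : (PySem.Dict.mk (kv :: ps)).get? f = some kv.2 := by
        rw [PySem.Dict.get?_mk_cons]
        simp [hk]
      show (PySem.Dict.update (d.insert kv.1 kv.2) ps).get? f = d.get? f
      rw [pv_get?_update_notin ps _ f (by
        intro x hx he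
        exact hnd.1 (by rw [hk, ← he]; exact List.mem_map_of_mem hx))]
      rw [hk, PySem.Dict.get?_insert_self, ← h, hmk]
    · have hmk : (PySem.Dict.mk (kv :: ps)).get? f = (PySem.Dict.mk ps).get? f := by
        rw [PySem.Dict.get?_mk_cons]
        simp [hk]
      show (PySem.Dict.update (d.insert kv.1 kv.2) ps).get? f = d.get? f
      rw [ih (d.insert kv.1 kv.2) hnd.2 (by
        rw [PySem.Dict.get?_insert_of_ne d kv.2 (Ne.symm hk), ← hmk, h])]
      exact PySem.Dict.get?_insert_of_ne d kv.2 (Ne.symm hk)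

-- A's literal condition is match-key equality, per _type
theorem pv_condA_iff (t : String) (fs : List String) (d fi : PySem.Dict String String)
    (hfs : pvKeyFields t = some fs) :
    (pvCondA t d fi = true ↔ pvKeyB fs fi = pvKeyB fs d) := by
  unfold pvKeyFields at hfs
  split_ifs at hfs with h1 h2
  · have ht : t = "ptf_group" := by simpa using h1
    subst ht
    injection hfs with hfs
    subst hfs
    have e2 : (("ptf_group" : String) == "single_ptf") = false := by decide
    simp only [pvCondA, e2, Bool.false_and, Bool.or_false, beq_self_eq_true, Bool.true_and,
      Bool.and_eq_true, beq_iff_eq, pvKeyB, List.map_cons, List.map_nil, List.cons.injEq,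
      and_true]
    constructor
    · rintro ⟨ha, hb⟩; exact ⟨ha.symm, hb.symm⟩
    · rintro ⟨ha, hb⟩; exact ⟨ha.symm, hb.symm⟩
  · have ht : t = "single_ptf" := by simpa using h2
    subst ht
    injection hfs with hfs
    subst hfs
    have e2 : (("single_ptf" : String) == "ptf_group") = false := by decide
    simp only [pvCondA, e2, Bool.false_and, Bool.false_or, beq_self_eq_true, Bool.true_and,
      beq_iff_eq, pvKeyB, List.map_cons, List.map_nil, List.cons.injEq, and_true]
    exact ⟨fun h => h.symm, fun h => h.symm⟩

theorem pv_condA_none (t : String) (d fi : PySem.Dict String String)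
    (hfs : pvKeyFields t = none) : pvCondA t d fi = false := by
  unfold pvKeyFields at hfs
  split_ifs at hfs with h1 h2
  have h1' : (t == "ptf_group") = false := by simpa using h1
  have h2' : (t == "single_ptf") = false := by simpa using h2
  simp [pvCondA, h1', h2']

-- MAIN: A's scan of the whole file list equals folding dict.update over the matching bucket
theorem pv_main (t : String) (fs : List String) (file : List (List (String × String)))
    (d : PySem.Dict String String) (hd : d.keys.Nodup)
    (hfile : ∀ l ∈ file, (l.map Prod.fst).Nodup) (hfs : pvKeyFields t = some fs) :
    pvFoldA t file d
      = (file.filter (fun fi => pvKeyB fs (PySem.Dict.mk fi) == pvKeyB fs d)).foldl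
          (fun d fi => PySem.Dict.update d fi) d := by
  induction file generalizing d with
  | nil => rfl
  | cons fi rest ih =>
    have hfi : (fi.map Prod.fst).Nodup := hfile fi List.mem_cons_self
    have hrest : ∀ l ∈ rest, (l.map Prod.fst).Nodup :=
      fun l hl => hfile l (List.mem_cons_of_mem _ hl)
    by_cases hm : pvKeyB fs (PySem.Dict.mk fi) = pvKeyB fs d
    · have hcond : pvCondA t d (PySem.Dict.mk fi) = true :=
        (pv_condA_iff t fs d (PySem.Dict.mk fi) hfs).mpr hm
      have hstep : pvFoldA t (fi :: rest) d = pvFoldA t rest (PySem.Dict.update d fi) := by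
        show List.foldl _ (if pvCondA t d (PySem.Dict.mk fi) then fi.foldl pvWriteA d else d)
            rest = _
        rw [hcond, if_pos rfl, pv_guard_eq_update fi d hd]
        rfl
      have hkey : pvKeyB fs (PySem.Dict.update d fi) = pvKeyB fs d := by
        unfold pvKeyB
        apply List.map_congr_left
        intro f hf
        exact pv_get?_update_agree fi d f hfi (List.map_inj_left.mp hm f hf)
      rw [hstep, ih (PySem.Dict.update d fi) (PySem.Dict.nodup_keys_update d fi hd) hrest]
      rw [hkey]
      rw [List.filter_cons, if_pos (by simpa [beq_iff_eq] using hm)]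
      rfl
    · have hcond : pvCondA t d (PySem.Dict.mk fi) = false := by
        cases hcc : pvCondA t d (PySem.Dict.mk fi)
        · rfl
        · exact absurd ((pv_condA_iff t fs d (PySem.Dict.mk fi) hfs).mp hcc) hm
      have hstep : pvFoldA t (fi :: rest) d = pvFoldA t rest d := by
        show List.foldl _ (if pvCondA t d (PySem.Dict.mk fi) then fi.foldl pvWriteA d else d)
            rest = _
        rw [hcond]
        rfl
      rw [hstep, ih d hd hrest]
      rw [List.filter_cons, if_neg (by simpa [beq_iff_eq] using hm)]

-- dict-algebra: merging updates into one dict and applying it once is the same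

theorem pv_insert_comm (e : PySem.Dict String String) (k p1 : String) (v p2 : String)
    (hck : e.contains k = true) (hpk : p1 ≠ k) :
    (e.insert k v).insert p1 p2 = (e.insert p1 p2).insert k v := by
  by_cases hp : e.contains p1 = true
  · apply PySem.Dict.ext
    have hck2 : (e.insert p1 p2).contains k = true := by
      rw [PySem.Dict.contains_insert]; simp [hck]
    have hp2 : (e.insert k v).contains p1 = true := by
      rw [PySem.Dict.contains_insert]; simp [hp]
    rw [PySem.Dict.items_insert_of_contains _ _ hp2,
        PySem.Dict.items_insert_of_contains _ _ hck,
        PySem.Dict.items_insert_of_contains _ _ hck2,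
        PySem.Dict.items_insert_of_contains _ _ hp,
        List.map_map, List.map_map]
    apply List.map_congr_left
    intro q _
    by_cases h1 : q.1 = k
    · simp [Function.comp, h1, Ne.symm hpk]
    · by_cases h2 : q.1 = p1
      · simp [Function.comp, h2, hpk]
      · simp [Function.comp, h1, h2]
  · have hpf : e.contains p1 = false := by simpa using hp
    apply PySem.Dict.ext
    have hp2 : (e.insert k v).contains p1 = false := by
      rw [PySem.Dict.contains_insert]
      simp [hpf, hpk]
    have hck2 : (e.insert p1 p2).contains k = true := by
      rw [PySem.Dict.contains_insert]; simp [hck]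
    rw [PySem.Dict.items_insert_of_not_contains _ _ hp2,
        PySem.Dict.items_insert_of_contains _ _ hck,
        PySem.Dict.items_insert_of_contains _ _ hck2,
        PySem.Dict.items_insert_of_not_contains _ _ hpf,
        List.map_append]
    simp [hpk]

theorem pv_update_insert_present (ps : List (String × String)) (e : PySem.Dict String String)
    (k v : String) (hck : e.contains k = true) (hk : ∀ kv ∈ ps, kv.1 ≠ k) :
    PySem.Dict.update (e.insert k v) ps = (PySem.Dict.update e ps).insert k v := by
  induction ps generalizing e with
  | nil => rfl
  | cons p ps ih =>
    show PySem.Dict.update ((e.insert k v).insert p.1 p.2) ps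
        = (PySem.Dict.update (e.insert p.1 p.2) ps).insert k v
    rw [pv_insert_comm e k p.1 v p.2 hck (hk p List.mem_cons_self)]
    exact ih (e.insert p.1 p.2)
      (by rw [PySem.Dict.contains_insert]; simp [hck])
      (fun x hx => hk x (List.mem_cons_of_mem _ hx))

theorem pv_update_insert_overwrite (l2 : List (String × String)) (e : PySem.Dict String String)
    (k v0 v : String) (hk : ∀ kv ∈ l2, kv.1 ≠ k) :
    (PySem.Dict.update (e.insert k v0) l2).insert k v = PySem.Dict.update (e.insert k v) l2 := by
  rw [← PySem.Dict.insert_insert_self e k v0 v]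
  exact (pv_update_insert_present l2 (e.insert k v0) k v
    (PySem.Dict.contains_insert_self e k v0) hk).symm

theorem pv_update_items_insert (d X : PySem.Dict String String) (k v : String)
    (hX : X.keys.Nodup) :
    PySem.Dict.update d (X.insert k v).items = (PySem.Dict.update d X.items).insert k v := by
  cases hc : X.contains k with
  | false =>
    rw [PySem.Dict.items_insert_of_not_contains _ _ hc]
    show List.foldl _ d (X.items ++ [(k, v)]) = _
    rw [List.foldl_append]
    rfl
  | true =>
    have hg : (X.get? k).isSome = true := by
      rw [← PySem.Dict.contains_eq_isSome_get?, hc]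
    obtain ⟨v0, hv0⟩ := Option.isSome_iff_exists.mp hg
    obtain ⟨l1, l2, hsplit⟩ := List.append_of_mem (PySem.Dict.mem_items_of_get?_eq_some X hv0)
    have hnd : k ∉ l1.map Prod.fst ∧ k ∉ l2.map Prod.fst := by
      have hX' := hX
      rw [show X.keys = X.items.map Prod.fst from rfl, hsplit, List.map_append, List.map_cons,
        List.nodup_middle, List.nodup_cons, List.mem_append] at hX'
      exact ⟨fun h => hX'.1 (Or.inl h), fun h => hX'.1 (Or.inr h)⟩
    have h1 : ∀ kv ∈ l1, kv.1 ≠ k := by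
      intro kv hkv he; exact hnd.1 (he ▸ List.mem_map_of_mem hkv)
    have h2 : ∀ kv ∈ l2, kv.1 ≠ k := by
      intro kv hkv he; exact hnd.2 (he ▸ List.mem_map_of_mem hkv)
    have hitems : (X.insert k v).items = l1 ++ (k, v) :: l2 := by
      rw [PySem.Dict.items_insert_of_contains _ _ hc, hsplit, List.map_append, List.map_cons]
      congr 1
      · calc List.map (fun p => if p.1 == k then (k, v) else p) l1
            = List.map id l1 := List.map_congr_left (by
              intro p hp; simp [h1 p hp])
          _ = l1 := List.map_id _
      · congr 1
        · simp
        · calc List.map (fun p => if p.1 == k then (k, v) else p) l2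
              = List.map id l2 := List.map_congr_left (by
                intro p hp; simp [h2 p hp])
            _ = l2 := List.map_id _
    rw [hitems, hsplit]
    show PySem.Dict.update d (l1 ++ (k, v) :: l2)
        = (PySem.Dict.update d (l1 ++ (k, v0) :: l2)).insert k v
    have e1 : ∀ (w : String), PySem.Dict.update d (l1 ++ (k, w) :: l2)
        = PySem.Dict.update ((PySem.Dict.update d l1).insert k w) l2 := by
      intro w
      show List.foldl _ d (l1 ++ (k, w) :: l2) = _
      rw [List.foldl_append]
      rfl
    rw [e1 v, e1 v0]
    exact (pv_update_insert_overwrite l2 (PySem.Dict.update d l1) k v0 v h2).symm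

theorem pv_update_update (ps : List (String × String)) (d U : PySem.Dict String String)
    (hU : U.keys.Nodup) :
    PySem.Dict.update (PySem.Dict.update d U.items) ps
      = PySem.Dict.update d (U.update ps).items := by
  induction ps generalizing U with
  | nil => rfl
  | cons kv ps ih =>
    show PySem.Dict.update ((PySem.Dict.update d U.items).insert kv.1 kv.2) ps
        = PySem.Dict.update d ((U.insert kv.1 kv.2).update ps).items
    rw [← pv_update_items_insert d U kv.1 kv.2 hU]
    exact ih (U.insert kv.1 kv.2) (PySem.Dict.nodup_keys_insert U kv.1 kv.2 hU)

theorem pv_merged_nodup (bucket : List (List (String × String)))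
    (u : PySem.Dict String String) (hu : u.keys.Nodup) :
    (bucket.foldl (fun u fi => PySem.Dict.update u fi) u).keys.Nodup := by
  induction bucket generalizing u with
  | nil => exact hu
  | cons fi bucket ih => exact ih _ (PySem.Dict.nodup_keys_update u fi hu)

theorem pv_bucket_fold (bucket : List (List (String × String)))
    (d : PySem.Dict String String) :
    bucket.foldl (fun d fi => PySem.Dict.update d fi) d
      = PySem.Dict.update d
          (bucket.foldl (fun u fi => PySem.Dict.update u fi) PySem.Dict.empty).items := by
  induction bucket using List.reverseRecOn with
  | nil => rfl
  | append_singleton bucket fi ih =>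
    rw [List.foldl_append, List.foldl_append, List.foldl_cons, List.foldl_nil,
      List.foldl_cons, List.foldl_nil, ih]
    exact pv_update_update fi d _ (pv_merged_nodup bucket PySem.Dict.empty (by simp [PySem.Dict.empty]))

-- B's index bucket for key K merges exactly the matching file items, in order
theorem pv_index_aux (fs : List String) (file : List (List (String × String)))
    (K : List (Option String)) (idx : PySem.Dict (List (Option String)) (PySem.Dict String String)) :
    (file.foldl (fun idx fi =>
        idx.insert (pvKeyB fs (PySem.Dict.mk fi))
          (PySem.Dict.update (idx.getD (pvKeyB fs (PySem.Dict.mk fi)) PySem.Dict.empty) fi))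
        idx).getD K PySem.Dict.empty
      = (file.filter (fun fi => pvKeyB fs (PySem.Dict.mk fi) == K)).foldl
          (fun u fi => PySem.Dict.update u fi) (idx.getD K PySem.Dict.empty) := by
  induction file generalizing idx with
  | nil => rfl
  | cons fi file ih =>
    rw [List.foldl_cons, ih, List.filter_cons]
    by_cases hk : pvKeyB fs (PySem.Dict.mk fi) = K
    · rw [if_pos (by simpa [beq_iff_eq] using hk), List.foldl_cons, hk,
        PySem.Dict.getD_insert_self]
    · rw [if_neg (by simpa [beq_iff_eq] using hk),
        PySem.Dict.getD_insert_of_ne _ _ _ (fun h => hk h.symm)]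

theorem pv_index_getD (fs : List String) (file : List (List (String × String)))
    (K : List (Option String)) :
    (pvIndexB fs file).getD K PySem.Dict.empty
      = (file.filter (fun fi => pvKeyB fs (PySem.Dict.mk fi) == K)).foldl
          (fun u fi => PySem.Dict.update u fi) PySem.Dict.empty := by
  rw [pvIndexB, pv_index_aux]
  rfl

-- ===== VERDICT (by name: the statement is the Claim_ definition above) =====
theorem pv_foldA_none (t : String) (file : List (List (String × String)))
    (hfs : pvKeyFields t = none) (d : PySem.Dict String String) :
    pvFoldA t file d = d := by
  unfold pvFoldA
  induction file generalizing d with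
  | nil => rfl
  | cons fi rest ihf =>
    rw [List.foldl_cons, pv_condA_none t _ _ hfs]
    simpa using ihf d

theorem checksum_before_upsert_spec : Claim_equal_checksum_before_upsert := by
  intro t db file _hdom hpre
  unfold Spec_checksum_before_upsert checksum_before_upsert checksum_before_upsert_alt
  cases hfs : pvKeyFields t with
  | none =>
    simp only
    have hitem : ∀ di, (pvFoldA t file (PySem.Dict.mk di)).items = di := by
      intro di
      rw [pv_foldA_none t file hfs]
    calc db.map (fun di => (pvFoldA t file (PySem.Dict.mk di)).items)
        = db.map id := List.map_congr_left (fun di _ => hitem di)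
      _ = db := List.map_id _
  | some fs =>
    simp only
    apply List.map_congr_left
    intro di _hdi
    have hd : (PySem.Dict.mk di).keys.Nodup := by
      rw [PySem.Dict.keys_mk]
      exact hpre.1 di _hdi
    rw [pv_main t fs file (PySem.Dict.mk di) hd hpre.2 hfs, pv_index_getD,
      pv_bucket_fold]
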